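-- pv_equiv track=rewrite | github.com/jtwyoyo/Project | Computer Data Communication/q4.py | Hamming_gen
-- ===== SOURCE A (Python) =====
-- def Hamming_gen(dataword):
--     #Find Number of Redundancy Bit
--     length = len(dataword)
--     for i in range(length):
--         if(2**i >= length + i + 1):
--             r = i
--             break
--     #Place Redundancy Bit
--     j = 0
--     k = 1
--     res = ''
--     for i in range(1, length + r+1):
--         if(i == 2**j):
--             res = res + '0'
--             j += 1
--         else:
--             res = res + dataword[-1 * k]
--             k += 1
--     #Reversing
--     output = res[::-1]
--     #Finding Parity bit
--     n = len(output)
--     for i in range(r):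
--         x = 0
--         for j in range(1, n + 1):
--             if(j & (2**i) == (2**i)):
--                 x = x ^ int(output[-1 * j])
--         output = output[:n-(2**i)] + str(x) + output[n-(2**i)+1:]
--     return output
-- ===== SOURCE B (Python) =====
-- def Hamming_gen(dataword):
--     # One forward pass over codeword positions 1..n (counted from the end), maintaining a
--     # parity-accumulator vector, instead of reversing and making r separate scan+splice passes.
--     length = len(dataword)
--     r = next(i for i in range(length) if 2 ** i >= length + i + 1)
--     n = length + r
--     acc = [0] * r
--     placed = []  # placed[j-1] = bit at position j counting from the END of the codeword
--     k = 0
--     for j in range(1, n + 1):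
--         if j & (j - 1) == 0:  # j is a power of two: redundancy slot
--             c = '0'
--         else:
--             c = dataword[length - 1 - k]
--             k += 1
--         placed.append(c)
--         b = int(c)
--         for i in range(r):
--             if j & (1 << i):
--                 acc[i] ^= b
--     for i in range(r):
--         placed[(1 << i) - 1] = str(acc[i])
--     return ''.join(reversed(placed))
-- ===== Notes on version B (the rewrite author's own statement) =====
-- stated objective: alternative
-- what changed: B builds the placed codeword front-to-front over positions counted from the end (direct power-of-two test and direct indexing instead of A's 2**j counter, negative indexing and final reversal) and computes all r parity bits in that single forward pass with an accumulator vector, then writes them by index, instead of A's r separate full scans each followed by a slice-splice rewrite of the string.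
-- outside the precondition, e.g. on Hamming_gen('49970'): A returns '40997601510', B returns '4499770010'
import Mathlib
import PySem

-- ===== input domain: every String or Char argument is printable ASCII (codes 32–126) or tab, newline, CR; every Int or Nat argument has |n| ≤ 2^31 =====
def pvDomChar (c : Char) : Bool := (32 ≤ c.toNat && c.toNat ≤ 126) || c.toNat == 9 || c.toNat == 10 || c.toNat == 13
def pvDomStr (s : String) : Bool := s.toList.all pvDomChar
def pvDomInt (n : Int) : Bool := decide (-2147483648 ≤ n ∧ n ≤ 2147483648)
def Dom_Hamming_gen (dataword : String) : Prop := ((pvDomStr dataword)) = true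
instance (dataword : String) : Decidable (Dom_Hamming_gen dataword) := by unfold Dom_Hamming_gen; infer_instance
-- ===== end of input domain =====

-- B builds the codeword in one forward pass with a parity-accumulator vector instead of A's
-- r separate scan+splice passes over the reversed string; equivalence is proved on datawords of
-- length ≥ 4 over digits 0-7 (elsewhere the Python A raises or its digit-splicing misbehaves).

-- ===== PORT A =====
-- int(c) for a single decimal digit char (exact there; Python raises ValueError elsewhere, excluded by Pre_)
def pvDigit (c : Char) : Nat := c.toNat - 48
-- str(x) for x < 10 (x is always 0 or 1 under Pre_)
def pvDigitChar (x : Nat) : Char := Char.ofNat (48 + x)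

-- A's r-search loop: first i in range(length) with 2**i >= length+i+1; none = UnboundLocalError
def pvFindRA (length i : Nat) : Option Nat :=
  if i < length then
    if length + i + 1 ≤ 2 ^ i then some i else pvFindRA length (i + 1)
  else none
termination_by length - i

-- one step of A's placement loop, state (j, k, res)
def pvStepA (dw : List Char) (s : Nat × Nat × List Char) (i : Nat) : Nat × Nat × List Char :=
  match s with
  | (j, k, res) =>
    if i = 2 ^ j then (j + 1, k, res ++ ['0'])
    else (j, k + 1, res ++ [((PySem.List.pyGet? dw (-(k : Int))).getD '0')])  -- none = IndexError, unreachable under Pre_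

-- one pass i of A's parity loop over output (length n)
def pvPassA (n : Nat) (out : List Char) (i : Nat) : List Char :=
  let x := (List.range' 1 n).foldl
    (fun (x j : Nat) => if j &&& 2 ^ i == 2 ^ i then x ^^^ pvDigit ((PySem.List.pyGet? out (-(j : Int))).getD '0') else x) 0
  PySem.List.slice out none (some ((n : Int) - 2 ^ i)) ++ [pvDigitChar x]
    ++ PySem.List.slice out (some ((n : Int) - 2 ^ i + 1)) none

def Hamming_gen (dataword : String) : String :=
  let dw := dataword.toList
  let length := dw.length
  match pvFindRA length 0 with
  | none => ""  -- UnboundLocalError; excluded by Pre_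
  | some r =>
    let res := ((List.range' 1 (length + r)).foldl (pvStepA dw) (0, 1, [])).2.2
    let output := ((PySem.List.slice? res none none (-1)).getD [])  -- res[::-1]
    String.ofList ((List.range r).foldl (pvPassA output.length) output)

-- ===== PORT B =====
-- int(c) / str(x) on B's side, same single-digit domain as A's
def pvDigitB (c : Char) : Nat := c.toNat - 48
def pvDigitCharB (x : Nat) : Char := Char.ofNat (48 + x)

-- B's r-search: next(i for i in range(length) if ...)
def pvFindRB (length : Nat) : Option Nat :=
  (List.range length).find? (fun i => length + i + 1 ≤ 2 ^ i)

-- one step of B's single forward loop, state (k, placed, acc)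
def pvStepB (dw : List Char) (s : Nat × List Char × List Nat) (j : Nat) : Nat × List Char × List Nat :=
  match s with
  | (k, placed, acc) =>
    let ck : Char × Nat := if j &&& (j - 1) == 0 then ('0', k) else (dw.getD (dw.length - 1 - k) '0', k + 1)
    let b := pvDigitB ck.1
    (ck.2, placed ++ [ck.1],
     acc.mapIdx (fun i a => if j &&& (1 <<< i) != 0 then a ^^^ b else a))

def Hamming_gen_alt (dataword : String) : String :=
  let dw := dataword.toList
  let length := dw.length
  match pvFindRB length with
  | none => ""  -- next() raises StopIteration; excluded by Pre_
  | some r =>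
    let n := length + r
    let s := (List.range' 1 n).foldl (pvStepB dw) (0, [], List.replicate r 0)
    let placed := (List.range r).foldl (fun p i => p.set (2 ^ i - 1) (pvDigitCharB (s.2.2.getD i 0))) s.2.1
    String.ofList placed.reverse

-- ===== PRECONDITION & SPEC =====
-- Pre_ restricts to datawords long enough for the redundancy-bit search to succeed (on shorter
-- inputs A raises UnboundLocalError) whose chars are digits that keep every parity XOR below 10
-- (all digits below 8, or one repeated digit): on non-digit chars A raises ValueError, and when a
-- parity XOR reaches 10..15 A splices the multi-digit str(x) into the string — an accident of
-- A's slice-rewrite that shifts every later position.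
def Pre_Hamming_gen (dataword : String) : Prop :=
  4 ≤ dataword.toList.length ∧
    (dataword.toList.all (fun c => '0' ≤ c && c ≤ '7') = true ∨
      (dataword.toList.all (fun c => '0' ≤ c && c ≤ '9') = true ∧
        dataword.toList.all (fun c => c == dataword.toList.headD '0') = true))
instance (dataword : String) : Decidable (Pre_Hamming_gen dataword) := by unfold Pre_Hamming_gen; infer_instance

def pvWitness_Hamming_gen : String := "10110101"

def Spec_Hamming_gen (dataword : String) (out : String) : Prop := out = Hamming_gen_alt dataword
instance (dataword : String) (out : String) : Decidable (Spec_Hamming_gen dataword out) := by unfold Spec_Hamming_gen; infer_instance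

-- ===== CLAIM (what is proved, stated in full; the proofs are below) =====
def Claim_equal_Hamming_gen : Prop := ∀ (dataword : String), Dom_Hamming_gen dataword → Pre_Hamming_gen dataword → Spec_Hamming_gen dataword (Hamming_gen dataword)

-- ===== LEMMAS AND PROOFS =====
theorem pv_digitB_eq : pvDigitB = pvDigit := rfl
theorem pv_digitCharB_eq : pvDigitCharB = pvDigitChar := rfl

-- proof-only helpers: the common parity value and the written-back power positions
def pvXor (res : List Char) (m i : Nat) : Nat :=
  (List.range' 1 m).foldl (fun x j => if j &&& 2 ^ i == 2 ^ i then x ^^^ pvDigit (res.getD (j-1) '0') else x) 0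

def pvSetP (res : List Char) (acc : Nat → Nat) (i : Nat) : List Char :=
  (List.range i).foldl (fun p t => p.set (2 ^ t - 1) (pvDigitChar (acc t))) res


theorem pv_reverse_set {α : Type} (l : List α) (n : Nat) (a : α) (h : n < l.length) :
    (l.set n a).reverse = l.reverse.set (l.length - 1 - n) a := by
  apply List.ext_getElem?
  intro i
  by_cases hi : i < l.length
  · rw [List.getElem?_reverse (by simpa using hi), List.length_set]
    by_cases hin : i = l.length - 1 - n
    · subst hin
      have e : l.length - 1 - (l.length - 1 - n) = n := by omega
      rw [e, List.getElem?_set_self (by omega), List.getElem?_set_self (by simpa using hi)]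
    · rw [List.getElem?_set_ne (by omega), List.getElem?_set_ne (Ne.symm hin),
        List.getElem?_reverse (by simpa using hi)]
  · rw [List.getElem?_eq_none (by simpa using hi), List.getElem?_eq_none (by simp; omega)]

theorem pv_findRA_eq (L : Nat) : ∀ n i, n = L - i → pvFindRA L i = (List.range' i n).find? (fun t => decide (L + t + 1 ≤ 2 ^ t)) := by
  intro n
  induction n with
  | zero => intro i h; rw [pvFindRA]; simp; omega
  | succ n ih =>
    intro i h
    rw [pvFindRA, List.range'_succ, List.find?_cons]
    have hi : i < L := by omega
    simp only [hi, if_true]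
    by_cases hc : L + i + 1 ≤ 2 ^ i
    · simp [hc]
    · simp only [hc, if_false]
      exact ih (i+1) (by omega)

theorem pv_findR_AB (L : Nat) : pvFindRA L 0 = pvFindRB L := by
  rw [pv_findRA_eq L L 0 (by omega), pvFindRB, List.range_eq_range']

theorem pv_L_le_pow (L : Nat) (h : 4 ≤ L) : L ≤ 2 ^ (L - 2) := by
  induction L with
  | zero => omega
  | succ L ih =>
    rcases Nat.lt_or_ge L 4 with h4 | h4
    · interval_cases L <;> simp_all
    · have := ih h4
      have e : L + 1 - 2 = (L - 2) + 1 := by omega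
      rw [e, pow_succ]
      omega

-- r exists and is the least index satisfying the bound
theorem pv_findRB_spec (L : Nat) (h : 4 ≤ L) :
    ∃ r, pvFindRB L = some r ∧ L + r + 1 ≤ 2 ^ r ∧ (∀ t < r, 2 ^ t < L + t + 1) ∧ 3 ≤ r := by
  have hsome : (pvFindRB L).isSome := by
    apply List.find?_isSome.mpr
    refine ⟨L - 1, by simp; omega, ?_⟩
    simp only [decide_eq_true_eq]
    have := pv_L_le_pow L h
    have : 2 ^ (L - 2) * 2 ≤ 2 ^ (L - 1) := by
      rw [← pow_succ]
      apply Nat.pow_le_pow_right (by omega)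
      omega
    omega
  obtain ⟨r, hr⟩ := Option.isSome_iff_exists.mp hsome
  obtain ⟨hpr, as, bs, heq, hall⟩ := List.find?_eq_some_iff_append.mp hr
  have hlen : as.length < L := by
    have := congrArg List.length heq
    simp at this; omega
  have has : as = List.range as.length := by
    have : as <+: List.range L := ⟨r :: bs, heq.symm⟩
    rw [List.prefix_iff_eq_take, List.take_range, Nat.min_eq_left hlen.le] at this
    exact this
  have hras : r = as.length := by
    have := congrArg (fun l => l[as.length]?) heq
    simp only [List.getElem?_range hlen] at this
    rw [List.getElem?_append_right (le_refl _)] at this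
    simp at this
    omega
  have hmin : ∀ t < r, 2 ^ t < L + t + 1 := by
    intro t ht
    have : t ∈ as := by rw [has, List.mem_range]; omega
    have := hall t this
    simp at this
    omega
  refine ⟨r, hr, by simpa using hpr, hmin, ?_⟩
  by_contra hb
  push Not at hb
  interval_cases r <;> [skip; skip; skip] <;> simp at hpr <;> omega

theorem pv_two_pow_and_pred (t : Nat) : 2 ^ t &&& (2 ^ t - 1) = 0 := by
  apply Nat.eq_of_testBit_eq
  intro i
  simp

theorem pv_and_pred_pow (j : Nat) (hj : 1 ≤ j) (h : j &&& (j - 1) = 0) : j = 2 ^ Nat.log2 j := by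
  set m := Nat.log2 j with hm
  have h1 : 2 ^ m ≤ j := Nat.log2_self_le (by omega)
  have h2 : j < 2 ^ (m + 1) := Nat.lt_log2_self
  by_contra hne
  have hj1 : 2 ^ m ≤ j - 1 := by omega
  have hbit : ∀ x, 2 ^ m ≤ x → x < 2 ^ (m+1) → x.testBit m = true := by
    intro x hx1 hx2
    rw [Nat.testBit_eq_decide_div_mod_eq]
    have : x / 2 ^ m = 1 := by
      apply Nat.div_eq_of_lt_le
      · omega
      · rw [pow_succ] at hx2; omega
    simp [this]
  have := congrArg (fun x => Nat.testBit x m) h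
  simp only [Nat.testBit_and, Nat.zero_testBit] at this
  rw [hbit j h1 h2, hbit (j-1) hj1 (by omega)] at this
  simp at this

-- the branch conditions agree, given the jc invariant
theorem pv_cond_iff (m jc : Nat) (h1 : m < 2 ^ jc) (h2 : 2 ^ jc ≤ 2 * m + 1) :
    (m + 1 = 2 ^ jc) ↔ ((m + 1) &&& m = 0) := by
  constructor
  · intro h
    have := pv_two_pow_and_pred jc
    rw [← h] at this
    simpa using this
  · intro h
    have hpow := pv_and_pred_pow (m+1) (by omega) (by simpa using h)
    set t := Nat.log2 (m+1)
    have h1' : m + 1 ≤ 2 ^ jc := h1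
    have h2' : 2 ^ jc < 2 * (m + 1) := by omega
    -- 2^t = m+1 ≤ 2^jc < 2·(m+1) = 2^(t+1) so jc = t
    have ht1 : 2 ^ t ≤ 2 ^ jc := by omega
    have ht2 : 2 ^ jc < 2 ^ (t + 1) := by rw [pow_succ]; omega

    have hjt : jc = t := by
      have a1 := (Nat.pow_le_pow_iff_right (by omega : 1 < 2)).mp ht1
      have a2 := (Nat.pow_lt_pow_iff_right (by omega : 1 < 2)).mp ht2
      omega
    rw [hjt]
    exact hpow

theorem pv_bcond (j i : Nat) : (j &&& (1 <<< i) != 0) = (j &&& 2 ^ i == 2 ^ i) := by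
  rw [Nat.one_shiftLeft, Nat.and_two_pow]
  have hp : (0:Nat) < 2 ^ i := Nat.two_pow_pos i
  cases h : j.testBit i <;> simp <;> omega

theorem pv_mapIdx_map_range (r : Nat) (f : Nat → Nat) (g : Nat → Nat → Nat) :
    ((List.range r).map f).mapIdx (fun i a => g i a) = (List.range r).map (fun i => g i (f i)) := by
  apply List.ext_getElem
  · simp
  · intro i h1 h2
    simp [List.getElem_mapIdx]

theorem pv_xor_step (res : List Char) (c : Char) (m i : Nat) (hl : res.length = m) :
    pvXor (res ++ [c]) (m+1) i =
      if (m+1) &&& 2 ^ i == 2 ^ i then pvXor res m i ^^^ pvDigit c else pvXor res m i := by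
  unfold pvXor
  rw [List.range'_1_concat, List.foldl_append]
  have hcong : (List.range' 1 m).foldl
      (fun x j => if j &&& 2 ^ i == 2 ^ i then x ^^^ pvDigit ((res ++ [c]).getD (j-1) '0') else x) 0
      = (List.range' 1 m).foldl
      (fun x j => if j &&& 2 ^ i == 2 ^ i then x ^^^ pvDigit (res.getD (j-1) '0') else x) 0 := by
    apply PySem.List.foldl_congr_mem
    intro acc x hx
    have hx' := List.mem_range'_1.mp hx
    rw [List.getD_append _ _ _ _ (by omega)]
  rw [hcong]
  have e1 : 1 + m = m + 1 := by omega
  rw [e1]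
  simp only [List.foldl_cons, List.foldl_nil]
  have e2 : (res ++ [c]).getD (m + 1 - 1) '0' = c := by
    rw [List.getD_append_right _ _ _ _ (by omega)]
    simp [hl]
  rw [e2]

theorem pv_place_inv (dw : List Char) (r : Nat)
    (hmin : ∀ t < r, 2 ^ t < dw.length + t + 1) (hmax : dw.length + r + 1 ≤ 2 ^ r) (hr : 1 ≤ r) :
    ∀ m, m ≤ dw.length + r →
    ∃ jc res,
      (List.range' 1 m).foldl (pvStepA dw) (0, 1, []) = (jc, (m - jc) + 1, res) ∧
      (List.range' 1 m).foldl (pvStepB dw) (0, [], List.replicate r 0)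
        = (m - jc, res, (List.range r).map (fun i => pvXor res m i)) ∧
      res.length = m ∧ jc ≤ m ∧ m < 2 ^ jc ∧ 2 ^ jc ≤ 2 * m + 1 := by
  intro m
  induction m with
  | zero =>
    intro _
    refine ⟨0, [], by simp, ?_, by simp, by simp, by simp, by simp⟩
    simp only [List.range'_zero, List.foldl_nil]
    have : (List.range r).map (fun i => pvXor [] 0 i) = List.replicate r 0 := by
      apply List.eq_replicate_iff.mpr
      refine ⟨by simp, ?_⟩
      intro b hb
      simp only [List.mem_map] at hb
      obtain ⟨i, _, hi⟩ := hb
      simp [pvXor] at hi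
      omega
    rw [this]
  | succ m ih =>
    intro hm
    obtain ⟨jc, res, hA, hB, hlen, hjm, hinv1, hinv2⟩ := ih (by omega)
    rw [List.range'_1_concat, List.foldl_append, List.foldl_append, hA, hB]
    have e1 : 1 + m = m + 1 := by omega
    rw [e1]
    simp only [List.foldl_cons, List.foldl_nil]
    have hcond := pv_cond_iff m jc hinv1 hinv2
    by_cases hc : m + 1 = 2 ^ jc
    · -- power-of-two slot
      have hc' : ((m+1) &&& m == 0) = true := by simp [← hcond]; exact hc
      refine ⟨jc + 1, res ++ ['0'], ?_, ?_, by simp [hlen], by omega, ?_, ?_⟩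
      · simp only [List.foldl_cons, List.foldl_nil, pvStepA]
        rw [if_pos hc]
        have e : m + 1 - (jc + 1) = m - jc := by omega
        rw [e]
      · simp only [List.foldl_cons, List.foldl_nil, pvStepB, pv_digitB_eq]
        rw [show (m + 1 - 1) = m from rfl, hc']
        simp only [if_true]
        have e : m + 1 - (jc + 1) = m - jc := by omega
        rw [e]
        simp only [Prod.mk.injEq]
        refine ⟨trivial, trivial, ?_⟩
        rw [pv_mapIdx_map_range]
        apply List.map_congr_left
        intro i hi
        rw [pv_bcond, pv_xor_step res '0' m i hlen]
      · calc m + 1 < m + 1 + 1 := by omega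
          _ ≤ 2 ^ (jc + 1) := by rw [pow_succ]; omega
      · rw [pow_succ]; omega
    · -- data slot
      have hc' : ((m+1) &&& m == 0) = false := by
        simp only [beq_eq_false_iff_ne, ne_eq]
        intro h; exact hc (hcond.mpr h)
      have hklen : m - jc < dw.length := by
        rcases Nat.lt_or_ge jc r with hjr | hjr
        · -- jc < r : counting via powers
          have hs : 2 ^ (r - 1) < dw.length + r := by
            have := hmin (r-1) (by omega)
            omega
          have hsplit : 2 ^ (r - 1) = 2 ^ jc * 2 ^ (r - 1 - jc) := by
            rw [← pow_add]; congr 1; omega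
          set s := r - 1 - jc with hsdef
          have h2s : s < 2 ^ s := Nat.lt_two_pow_self
          have hmul : (m + 1) * (s + 1) ≤ 2 ^ jc * 2 ^ s := Nat.mul_le_mul (by omega) (by omega)
          have hms : s ≤ (m + 1) * s := Nat.le_mul_of_pos_left s (by omega)
          have hexp : (m + 1) * (s + 1) = (m + 1) * s + (m + 1) := by ring
          omega
        · omega
      refine ⟨jc, res ++ [dw.getD (dw.length - 1 - (m - jc)) '0'], ?_, ?_, by simp [hlen], by omega, ?_, by omega⟩
      · simp only [List.foldl_cons, List.foldl_nil, pvStepA]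
        rw [if_neg hc]
        have hget : (PySem.List.pyGet? dw (-((m - jc + 1 : Nat) : Int))).getD '0'
            = dw.getD (dw.length - 1 - (m - jc)) '0' := by
          rw [PySem.List.pyGet?_neg_natCast dw (m - jc + 1) (by omega) (by omega)]
          rw [List.getD_eq_getElem?_getD]
          congr 2
          omega
        rw [hget]
        have e : m + 1 - jc = (m - jc) + 1 := by omega
        rw [e]
      · simp only [List.foldl_cons, List.foldl_nil, pvStepB, pv_digitB_eq]
        rw [show (m + 1 - 1) = m from rfl, hc']
        simp only [Bool.false_eq_true, if_false]
        have e : m + 1 - jc = (m - jc) + 1 := by omega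
        rw [e]
        simp only [Prod.mk.injEq]
        refine ⟨trivial, trivial, ?_⟩
        rw [pv_mapIdx_map_range]
        apply List.map_congr_left
        intro i hi
        rw [pv_bcond, pv_xor_step res _ m i hlen]
      · omega

theorem pv_setP_length (res : List Char) (acc : Nat → Nat) (i : Nat) :
    (pvSetP res acc i).length = res.length := by
  induction i with
  | zero => rfl
  | succ i ih => rw [pvSetP, List.range_succ, List.foldl_append] at *; simp [ih]

theorem pv_setP_getD_ne (res : List Char) (acc : Nat → Nat) (i m : Nat) (d : Char)
    (h : ∀ t < i, m ≠ 2 ^ t - 1) :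
    (pvSetP res acc i).getD m d = res.getD m d := by
  induction i with
  | zero => rfl
  | succ i ih =>
    rw [pvSetP, List.range_succ, List.foldl_append] at *
    simp only [List.foldl_cons, List.foldl_nil]
    rw [List.getD_eq_getElem?_getD, List.getElem?_set_ne (Ne.symm (h i (by omega))),
      ← List.getD_eq_getElem?_getD]
    exact ih (fun t ht => h t (by omega))

theorem pv_parity_stage (res : List Char) (r : Nat) (hle : ∀ i < r, 2 ^ i ≤ res.length) :
    ∀ i ≤ r, (List.range i).foldl (pvPassA res.length) res.reverse
      = (pvSetP res (fun t => pvXor res res.length t) i).reverse := by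
  set n := res.length with hn
  intro i
  induction i with
  | zero => intro _; rfl
  | succ i ih =>
    intro hi
    rw [List.range_succ, List.foldl_append, ih (by omega)]
    simp only [List.foldl_cons, List.foldl_nil]
    set S := pvSetP res (fun t => pvXor res n t) i with hS
    have hSlen : S.length = n := pv_setP_length res _ i
    have h2i : 2 ^ i ≤ n := hle i (by omega)
    have h2ipos : 1 ≤ 2 ^ i := Nat.one_le_two_pow
    rw [pvPassA]
    -- the scan reads only unmodified positions, so it computes pvXor of the original
    have hx : (List.range' 1 n).foldl
        (fun (x j : Nat) => if j &&& 2 ^ i == 2 ^ i then x ^^^ pvDigit ((PySem.List.pyGet? S.reverse (-(j : Int))).getD '0') else x) 0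
        = pvXor res n i := by
      rw [pvXor]
      apply PySem.List.foldl_congr_mem
      intro acc j hj
      have hj' := List.mem_range'_1.mp hj
      by_cases hc : (j &&& 2 ^ i == 2 ^ i) = true
      · rw [hc]
        simp only [if_true]
        have hbit : j.testBit i = true := by
          have := Nat.and_two_pow j i
          rcases hb : j.testBit i
          · rw [hb] at this; simp at this; rw [this] at hc; simp at hc; omega
          · rfl
        have hread : (PySem.List.pyGet? S.reverse (-(j : Int))).getD '0' = res.getD (j-1) '0' := by
          rw [PySem.List.pyGet?_neg_natCast S.reverse j (by omega) (by simp [hSlen]; omega)]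
          rw [List.length_reverse, hSlen]
          rw [List.getElem?_reverse (by omega)]
          rw [hSlen]
          have e : n - 1 - (n - j) = j - 1 := by omega
          rw [e, ← List.getD_eq_getElem?_getD]
          apply pv_setP_getD_ne
          intro t ht hjt
          have hj2 : j = 2 ^ t := by have := Nat.one_le_two_pow (n := t); omega
          rw [hj2, Nat.testBit_two_pow] at hbit
          simp at hbit
          omega
        rw [hread]
      · simp only [Bool.not_eq_true] at hc
        rw [hc]
        simp
    rw [hx]
    -- the splice is a set at position n - 2^i, i.e. a set at 2^i - 1 before reversal
    have e1 : (n : Int) - 2 ^ i = ((n - 2 ^ i : Nat) : Int) := by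
      rw [Nat.cast_sub h2i]; push_cast; ring
    rw [e1]
    have e2 : ((n - 2 ^ i : Nat) : Int) + 1 = ((n - 2 ^ i + 1 : Nat) : Int) := by push_cast; ring
    rw [e2, PySem.List.slice_to_natCast, PySem.List.slice_from_natCast]
    have hset : S.reverse.take (n - 2 ^ i) ++ [pvDigitChar (pvXor res n i)]
        ++ S.reverse.drop (n - 2 ^ i + 1) = S.reverse.set (n - 2 ^ i) (pvDigitChar (pvXor res n i)) := by
      rw [List.set_eq_take_cons_drop _ (by simp [hSlen]; omega)]
      simp
    rw [hset]
    have hrev : S.reverse.set (n - 2 ^ i) (pvDigitChar (pvXor res n i))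
        = (S.set (2 ^ i - 1) (pvDigitChar (pvXor res n i))).reverse := by
      rw [pv_reverse_set S (2 ^ i - 1) _ (by omega)]
      congr 1
      omega
    rw [hrev]
    congr 1
    rw [pvSetP, List.range_succ, List.foldl_append]
    simp only [List.foldl_cons, List.foldl_nil]
    rfl


-- ===== VERDICT (by name: the statement is the Claim_ definition above) =====
theorem Hamming_gen_spec : Claim_equal_Hamming_gen := by
  intro dataword _ hpre
  obtain ⟨hlen4, _hbin⟩ := hpre
  simp only [Spec_Hamming_gen, Hamming_gen, Hamming_gen_alt]
  obtain ⟨r, hrB, hmax, hmin, hr3⟩ := pv_findRB_spec dataword.toList.length hlen4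
  rw [pv_findR_AB, hrB]
  obtain ⟨jc, res, hA, hB, hreslen, _, _, _⟩ :=
    pv_place_inv dataword.toList r hmin (by omega) (by omega)
      (dataword.toList.length + r) (le_refl _)
  simp only [hA, hB, PySem.List.slice?_none_none_neg_one, Option.getD_some, List.length_reverse,
    pv_digitCharB_eq]
  have hle : ∀ i < r, 2 ^ i ≤ res.length := by
    intro i hi
    have h1 : 2 ^ i ≤ 2 ^ (r - 1) := Nat.pow_le_pow_right (by omega) (by omega)
    have h2 := hmin (r - 1) (by omega)
    omega
  rw [show dataword.toList.length + r = res.length from hreslen.symm] at *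
  rw [pv_parity_stage res r hle r (le_refl r)]
  congr 1
  rw [pvSetP]
  congr 1
  apply PySem.List.foldl_congr_mem
  intro p i hi
  have hi' := List.mem_range.mp hi
  congr 2
  rw [List.getD_eq_getElem?_getD, List.getElem?_map, List.getElem?_range hi']
  rfl
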